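-- pv_equiv track=rewrite | github.com/akankshasainics/rgxlib | regex.py | break_regex
-- ===== SOURCE A (Python) =====
-- bracket_pair = { "(": ")", "[": "]"}
--
-- operators = {"+", "*"}
--
-- def find_closing_bracket(string: str, opening_loc: int) -> int:
-- 	stack = 1
-- 	open_brack = string[opening_loc]
-- 	backslash = 0
-- 	for i, char in  enumerate(string[opening_loc+1:], start = opening_loc+1):
-- 		if char == open_brack and backslash%2 == 0:
-- 			stack += 1
-- 		if char == bracket_pair[open_brack] and backslash%2 == 0:
-- 			stack -= 1
-- 		if stack == 0:
-- 			return i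
-- 		if char == "\\":
-- 			backslash += 1
-- 		else:
-- 			backslash = 0
--
-- 	if stack != 0:
-- 		raise ValueError("Unmatched opening bracket.")
--
-- def check_for_operator(pattern: str, i: int) -> int:
-- 	if i+1 == len(pattern) or pattern[i+1] not in operators:
-- 		return 0
-- 	return 1
--
-- def break_regex(pattern: str) -> list:
-- 	i = 0
-- 	groups = []
-- 	while i < len(pattern):
-- 		if pattern[i] in bracket_pair:
-- 			closing_bracket = find_closing_bracket(pattern, i)
-- 			is_operator = check_for_operator(pattern, closing_bracket)
-- 			if is_operator:
-- 				groups.append(pattern[i: closing_bracket+1+is_operator])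
-- 			else:
-- 				groups.append(pattern[i+1: closing_bracket])
-- 			i = (closing_bracket+1+is_operator)
--
-- 		elif pattern[i] == "\\":
-- 			if i+1 == len(pattern):
-- 				raise ValueError("Dangling backslash.")
-- 			is_operator = check_for_operator(pattern, i+1)
-- 			groups.append(pattern[i: i+2+is_operator])
-- 			i += (2 + is_operator)
--
-- 		elif pattern[i] == ")":
-- 			raise ValueError("Unmatched closing bracket.")
--
-- 		else:
-- 			is_operator = check_for_operator(pattern, i)
-- 			groups.append(pattern[i: i+1+is_operator])
-- 			i += (1 + is_operator)
--
-- 	return groups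
-- ===== SOURCE B (Python) =====
-- # B: one flat left-to-right state-machine scan (normal/escape/group states with a skip
-- # counter for consumed operator chars) instead of A's helper-plus-index-jump loop.
-- def break_regex(pattern: str) -> list:
-- 	groups = []
-- 	n = len(pattern)
-- 	state = 0  # 0 = top level, 1 = just saw top-level backslash, 2 = inside group
-- 	start = 0
-- 	opener = closer = ''
-- 	depth = 0
-- 	bs = 0
-- 	skip = 0
-- 	for i, ch in enumerate(pattern):
-- 		if skip:
-- 			skip -= 1
-- 			continue
-- 		if state == 0:
-- 			if ch == '\\':
-- 				state = 1
-- 				start = i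
-- 			elif ch == '(' or ch == '[':
-- 				state = 2
-- 				opener = ch
-- 				closer = ')' if ch == '(' else ']'
-- 				depth = 1
-- 				bs = 0
-- 				start = i
-- 			elif ch == ')':
-- 				raise ValueError("Unmatched closing bracket.")
-- 			else:
-- 				if i + 1 < n and pattern[i + 1] in '+*':
-- 					groups.append(pattern[i:i + 2])
-- 					skip = 1
-- 				else:
-- 					groups.append(ch)
-- 		elif state == 1:
-- 			if i + 1 < n and pattern[i + 1] in '+*':
-- 				groups.append(pattern[start:i + 2])
-- 				skip = 1
-- 			else:
-- 				groups.append(pattern[start:i + 1])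
-- 			state = 0
-- 		else:
-- 			even = bs % 2 == 0
-- 			if ch == opener and even:
-- 				depth += 1
-- 			elif ch == closer and even:
-- 				depth -= 1
-- 			bs = bs + 1 if ch == '\\' else 0
-- 			if depth == 0:
-- 				if i + 1 < n and pattern[i + 1] in '+*':
-- 					groups.append(pattern[start:i + 2])
-- 					skip = 1
-- 				else:
-- 					groups.append(pattern[start + 1:i])
-- 				state = 0
-- 	if state == 1:
-- 		raise ValueError("Dangling backslash.")
-- 	if state == 2:
-- 		raise ValueError("Unmatched opening bracket.")
-- 	return groups
-- ===== Notes on version B (the rewrite author's own statement) =====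
-- stated objective: alternative
-- what changed: Replaces A's helper-function-plus-index-jump while loop (which calls find_closing_bracket, itself re-slicing the tail of the pattern, and skips i forward) by a single flat left-to-right for loop over enumerate driven by an explicit state machine (top-level / pending-escape / inside-group with depth and backslash parity) plus a skip counter for consumed operator characters.
-- outside the precondition, e.g. on break_regex(')'): A raises ValueError, B raises ValueError; on break_regex('('): A raises ValueError, B raises ValueError; on break_regex('['): A raises ValueError, B raises ValueError
import Mathlib
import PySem

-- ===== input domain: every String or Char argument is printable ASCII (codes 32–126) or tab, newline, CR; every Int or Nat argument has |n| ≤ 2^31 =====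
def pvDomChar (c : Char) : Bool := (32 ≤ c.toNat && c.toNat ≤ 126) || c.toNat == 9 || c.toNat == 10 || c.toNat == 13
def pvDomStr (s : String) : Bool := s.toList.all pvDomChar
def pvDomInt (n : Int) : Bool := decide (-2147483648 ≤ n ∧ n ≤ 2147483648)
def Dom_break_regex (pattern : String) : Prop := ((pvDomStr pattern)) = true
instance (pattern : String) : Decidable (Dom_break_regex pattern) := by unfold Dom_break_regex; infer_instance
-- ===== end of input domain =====

-- B replaces A's helper-plus-index-jump loop by one flat state-machine scan (alternative
-- decomposition, same cost); on inputs where Python A raises ValueError both ports return []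
-- (those inputs lie outside Pre_break_regex).

-- ===== PORT A =====

-- operators = {"+", "*"}
def isOp (c : Char) : Bool := c == '+' || c == '*'

-- bracket_pair[c]; in A it is only looked up at '(' and '['
def closeOf (c : Char) : Char := if c == '(' then ')' else ']'

-- pattern[a:b] for 0 ≤ a ≤ b with b ≤ len (the only slices A and B take): exact here
def sliceStr (s : List Char) (a b : Nat) : String := String.mk ((s.drop a).take (b - a))

-- the for-loop of find_closing_bracket (returns none where Python raises)
def auxFC (oc : Char) : List Char → Nat → Nat → Nat → Option Nat
  | [], _, _, _ => none
  | c :: rest, stack, i, bs =>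
    let stack1 := if c == oc && bs % 2 == 0 then stack + 1 else stack
    let stack2 := if c == closeOf oc && bs % 2 == 0 then stack1 - 1 else stack1
    if stack2 == 0 then some i
    else auxFC oc rest stack2 (i + 1) (if c == '\\' then bs + 1 else 0)

def findClose (s : List Char) (loc : Nat) : Option Nat :=
  auxFC (s.getD loc ' ') (s.drop (loc + 1)) 1 (loc + 1) 0

-- check_for_operator
def chk (s : List Char) (i : Nat) : Nat :=
  if i + 1 == s.length || !(isOp (s.getD (i + 1) ' ')) then 0 else 1

-- termination fact for A's while loop (the port cites it in decreasing_by)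
theorem auxFC_bound (oc : Char) : ∀ (rest : List Char) (stack i bs j : Nat),
    auxFC oc rest stack i bs = some j → i ≤ j ∧ j < i + rest.length := by
  intro rest
  induction rest with
  | nil => intro stack i bs j h; simp [auxFC] at h
  | cons c rest ih =>
    intro stack i bs j h
    simp only [auxFC] at h
    repeat' split at h
    all_goals
      simp only [Option.some.injEq, List.length_cons] at h ⊢
    all_goals
      first
        | omega
        | (have := ih _ _ _ _ h; omega)

theorem findClose_bound (s : List Char) (i j : Nat) (hi : i < s.length)
    (h : findClose s i = some j) : i + 1 ≤ j ∧ j < s.length := by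
  have := auxFC_bound (s.getD i ' ') (s.drop (i + 1)) 1 (i + 1) 0 j h
  simp only [List.length_drop] at this
  omega

-- the while-loop of break_regex, groups as accumulator; [] where Python raises
def loopA (s : List Char) (i : Nat) (acc : List String) : List String :=
  if h : i < s.length then
    let c := s.getD i ' '
    if c == '(' || c == '[' then
      match hfc : findClose s i with
      | none => []                                  -- "Unmatched opening bracket."
      | some j =>
        let op := chk s j
        let tok := if op == 1 then sliceStr s i (j + 1 + op) else sliceStr s (i + 1) j
        loopA s (j + 1 + op) (acc ++ [tok])
    else if c == '\\' then
      if i + 1 == s.length then []                  -- "Dangling backslash."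
      else
        let op := chk s (i + 1)
        loopA s (i + 2 + op) (acc ++ [sliceStr s i (i + 2 + op)])
    else if c == ')' then []                        -- "Unmatched closing bracket."
    else
      let op := chk s i
      loopA s (i + 1 + op) (acc ++ [sliceStr s i (i + 1 + op)])
  else acc
termination_by s.length - i
decreasing_by
  · have := findClose_bound s i j h hfc; omega
  · omega
  · omega

def break_regex (pattern : String) : List String := loopA pattern.toList 0 []

-- ===== PORT B =====

-- B's scanner state: top level / just saw a top-level backslash / inside a group
inductive BSt where
  | normal : BSt
  | esc (start : Nat) : BSt
  | grp (opener closer : Char) (start depth bs : Nat) : BSt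
deriving DecidableEq, Repr

-- the single for-loop of B; [] where Python raises
def runB (s : List Char) : List Char → Nat → BSt → Nat → List String → List String
  | [], _, st, _, acc =>
    match st with
    | .normal => acc
    | .esc _ => []                                  -- "Dangling backslash."
    | .grp _ _ _ _ _ => []                          -- "Unmatched opening bracket."
  | c :: rest, i, st, skip, acc =>
    match skip with
    | skip' + 1 => runB s rest (i + 1) st skip' acc
    | 0 =>
      match st with
      | .normal =>
        if c == '\\' then runB s rest (i + 1) (.esc i) 0 acc
        else if c == '(' || c == '[' then
          runB s rest (i + 1) (.grp c (if c == '(' then ')' else ']') i 1 0) 0 acc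
        else if c == ')' then []                    -- "Unmatched closing bracket."
        else if i + 1 < s.length && isOp (s.getD (i + 1) ' ') then
          runB s rest (i + 1) .normal 1 (acc ++ [sliceStr s i (i + 2)])
        else runB s rest (i + 1) .normal 0 (acc ++ [String.mk [c]])
      | .esc start =>
        if i + 1 < s.length && isOp (s.getD (i + 1) ' ') then
          runB s rest (i + 1) .normal 1 (acc ++ [sliceStr s start (i + 2)])
        else runB s rest (i + 1) .normal 0 (acc ++ [sliceStr s start (i + 1)])
      | .grp oc cc start depth bs =>
        let even := bs % 2 == 0
        let depth' := if c == oc && even then depth + 1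
                      else if c == cc && even then depth - 1 else depth
        let bs' := if c == '\\' then bs + 1 else 0
        if depth' == 0 then
          if i + 1 < s.length && isOp (s.getD (i + 1) ' ') then
            runB s rest (i + 1) .normal 1 (acc ++ [sliceStr s start (i + 2)])
          else runB s rest (i + 1) .normal 0 (acc ++ [sliceStr s (start + 1) i])
        else runB s rest (i + 1) (.grp oc cc start depth' bs') 0 acc

def break_regex_alt (pattern : String) : List String :=
  runB pattern.toList pattern.toList 0 .normal 0 []

-- ===== PRECONDITION & SPEC =====

-- Validator state machine (tokens never computed): a condition on the input only.
inductive PSt where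
  | n : PSt
  | e : PSt
  | g (oc : Char) (depth : Nat) (even : Bool) : PSt
deriving DecidableEq, Repr

def preStep : Option PSt → Char → Option PSt
  | none, _ => none
  | some .n, c =>
    if c == '\\' then some .e
    else if c == '(' || c == '[' then some (.g c 1 true)
    else if c == ')' then none
    else some .n
  | some .e, _ => some .n
  | some (.g oc d ev), c =>
    let cc := if oc == '(' then ')' else ']'
    let d' := if c == oc && ev then d + 1 else if c == cc && ev then d - 1 else d
    let ev' := if c == '\\' then !ev else true
    if d' == 0 then some .n else some (.g oc d' ev')

-- Pre_ excludes exactly the patterns on which Python A raises ValueError (unmatched or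
-- unclosed bracket, dangling backslash): every top-level backslash has a following char,
-- no top-level ')', and every top-level '(' / '[' is closed under A's same-bracket,
-- even-backslash-parity counting.
def Pre_break_regex (pattern : String) : Prop :=
  pattern.toList.foldl preStep (some .n) = some PSt.n

instance (pattern : String) : Decidable (Pre_break_regex pattern) := by
  unfold Pre_break_regex; infer_instance

def pvWitness_break_regex : String := "(ab)+x\\(*[c(]"

def Spec_break_regex (pattern : String) (out : List String) : Prop := out = break_regex_alt pattern
instance (pattern : String) (out : List String) : Decidable (Spec_break_regex pattern out) := by
  unfold Spec_break_regex; infer_instance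

-- ===== CLAIM (what is proved, stated in full; the proofs are below) =====
def Claim_equal_break_regex : Prop := ∀ (pattern : String), Dom_break_regex pattern → Pre_break_regex pattern → Spec_break_regex pattern (break_regex pattern)

-- ===== LEMMAS AND PROOFS =====

-- a skip of 1 just consumes the next character
theorem runB_skip (s : List Char) (k : Nat) (acc : List String) :
    runB s (s.drop k) k .normal 1 acc = runB s (s.drop (k + 1)) (k + 1) .normal 0 acc := by
  rcases Nat.lt_or_ge k s.length with h | h
  · rw [List.drop_eq_getElem_cons h]
    simp [runB]
  · rw [List.drop_eq_nil_of_le h, List.drop_eq_nil_of_le (by omega)]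
    simp [runB]

-- B inside a group runs A's find_closing_bracket scan
theorem runB_grp (s : List Char) (oc : Char) (hne : oc ≠ closeOf oc) :
    ∀ (n k stack bs start : Nat) (acc : List String), s.length - k ≤ n →
    runB s (s.drop k) k (.grp oc (closeOf oc) start stack bs) 0 acc
      = match auxFC oc (s.drop k) stack k bs with
        | none => []
        | some j =>
          if j + 1 < s.length && isOp (s.getD (j + 1) ' ') then
            runB s (s.drop (j + 1)) (j + 1) .normal 1 (acc ++ [sliceStr s start (j + 2)])
          else
            runB s (s.drop (j + 1)) (j + 1) .normal 0 (acc ++ [sliceStr s (start + 1) j])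
        := by
  intro n
  induction n with
  | zero =>
    intro k stack bs start acc hn
    rw [List.drop_eq_nil_of_le (by omega)]
    simp [runB, auxFC]
  | succ n ih =>
    intro k stack bs start acc hn
    rcases Nat.lt_or_ge k s.length with h | h
    · rw [List.drop_eq_getElem_cons h]
      simp only [runB, auxFC]
      by_cases h1 : (s[k] == oc && bs % 2 == 0) = true
      · have h2 : (s[k] == closeOf oc && bs % 2 == 0) = false := by
          rcases Bool.and_eq_true .. |>.mp h1 with ⟨ha, hb⟩
          simp only [beq_iff_eq] at ha
          simp [ha, hne]
        have hnz : ((stack + 1) == 0) = false := by simp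
        simp only [h1, h2, hnz, if_true, if_false, Bool.false_eq_true, ite_false, ite_true]
        rw [ih (k + 1) (stack + 1) (if (s[k] == '\\') = true then bs + 1 else 0) start acc (by omega)]
      · simp only [Bool.not_eq_true] at h1
        by_cases h2 : (s[k] == closeOf oc && bs % 2 == 0) = true
        · simp only [h1, h2, if_true, if_false, Bool.false_eq_true, ite_false, ite_true]
          by_cases hz : stack - 1 = 0
          · simp [hz]
          · have hz' : ((stack - 1) == 0) = false := by simp [hz]
            simp only [hz', Bool.false_eq_true, if_false, ite_false]
            rw [ih (k + 1) (stack - 1) (if (s[k] == '\\') = true then bs + 1 else 0) start acc (by omega)]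
        · simp only [Bool.not_eq_true] at h2
          simp only [h1, h2, Bool.false_eq_true, if_false, ite_false]
          by_cases hz : stack = 0
          · simp [hz]
          · have hz' : (stack == 0) = false := by simp [hz]
            simp only [hz', Bool.false_eq_true, if_false, ite_false]
            rw [ih (k + 1) stack (if (s[k] == '\\') = true then bs + 1 else 0) start acc (by omega)]
    · rw [List.drop_eq_nil_of_le h]
      simp [runB, auxFC]

-- chk agrees with B's lookahead condition
theorem chk_eq (s : List Char) (j : Nat) (hj : j + 1 ≤ s.length) :
    chk s j = if (decide (j + 1 < s.length) && isOp (s.getD (j + 1) ' ')) = true then 1 else 0 := by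
  unfold chk
  rcases Nat.lt_or_ge (j + 1) s.length with h | h
  · have hne : (j + 1 == s.length) = false := by simp; omega
    have hd : decide (j + 1 < s.length) = true := by simp [h]
    simp only [hne, hd, Bool.false_or, Bool.true_and]
    cases ho : isOp (s.getD (j + 1) ' ') <;> simp
  · have he : (j + 1 == s.length) = true := by simp; omega
    have hd : decide (j + 1 < s.length) = false := by simp; omega
    simp only [he, hd, Bool.true_or, Bool.false_and, if_true]
    simp

theorem single_char_slice (s : List Char) (i : Nat) (h : i < s.length) :
    sliceStr s i (i + 1) = String.mk [s[i]] := by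
  unfold sliceStr
  have h1 : i + 1 - i = 1 := by omega
  rw [h1, List.drop_eq_getElem_cons h, List.take_succ_cons, List.take_zero]

-- main loop correspondence
theorem mainEq (s : List Char) :
    ∀ (n i : Nat) (acc : List String), s.length - i ≤ n →
    runB s (s.drop i) i .normal 0 acc = loopA s i acc := by
  intro n
  induction n with
  | zero =>
    intro i acc hn
    rw [List.drop_eq_nil_of_le (by omega), loopA]
    simp only [runB]
    rw [dif_neg (by omega)]
  | succ n ih =>
    intro i acc hn
    rcases Nat.lt_or_ge i s.length with h | h
    · rw [List.drop_eq_getElem_cons h, loopA]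
      rw [dif_pos h]
      have hget : s.getD i ' ' = s[i] := List.getD_eq_getElem s ' ' h
      rw [hget]
      simp only [runB]
      by_cases hbs : (s[i] == '\\') = true
      · -- backslash branch
        have hbr : (s[i] == '(' || s[i] == '[') = false := by
          simp only [beq_iff_eq] at hbs ⊢; simp [hbs]
        simp only [hbs, hbr, Bool.false_eq_true, if_false, if_true, ite_true, ite_false]
        by_cases hend : i + 1 = s.length
        · rw [List.drop_eq_nil_of_le (by omega)]
          have : (i + 1 == s.length) = true := by simp [hend]
          simp [runB, this]
        · have hlt : i + 1 < s.length := by omega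
          have : (i + 1 == s.length) = false := by simp [hend]
          simp only [this, Bool.false_eq_true, if_false, ite_false]
          rw [List.drop_eq_getElem_cons hlt]
          simp only [runB]
          rw [chk_eq s (i + 1) (by omega)]
          by_cases hc : (decide (i + 1 + 1 < s.length) && isOp (s.getD (i + 1 + 1) ' ')) = true
          · simp only [hc, if_true, ite_true]
            rw [runB_skip, ih (i + 3) _ (by omega)]
          · simp only [hc, Bool.false_eq_true, if_false, ite_false]
            rw [ih (i + 2) _ (by omega)]
      · by_cases hbr : (s[i] == '(' || s[i] == '[') = true
        · -- bracket branch
          have hne : s[i] ≠ closeOf s[i] := by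
            rcases Bool.or_eq_true .. |>.mp hbr with h1 | h1 <;>
              (simp only [beq_iff_eq] at h1; rw [h1]; simp [closeOf])
          simp only [hbs, hbr, Bool.false_eq_true, if_false, if_true, ite_true, ite_false]
          have hcl : (if s[i] == '(' then ')' else ']') = closeOf s[i] := rfl
          rw [hcl, runB_grp s s[i] hne n (i + 1) 1 0 i acc (by omega)]
          have hfc : findClose s i = auxFC s[i] (s.drop (i + 1)) 1 (i + 1) 0 := by
            unfold findClose; rw [hget]
          rw [← hfc]
          cases hJ : findClose s i with
          | none => simp
          | some j =>
            have hb := findClose_bound s i j h hJ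
            simp only
            rw [chk_eq s j (by omega)]
            by_cases hc : (decide (j + 1 < s.length) && isOp (s.getD (j + 1) ' ')) = true
            · simp only [hc, if_true, ite_true]
              rw [runB_skip, ih (j + 2) _ (by omega)]
              norm_num
            · simp only [hc, Bool.false_eq_true, if_false, ite_false]
              rw [ih (j + 1) _ (by omega)]
              norm_num
        · by_cases hcp : (s[i] == ')') = true
          · simp [hbs, hbr, hcp]
          · -- literal branch
            simp only [hbs, hbr, hcp, Bool.false_eq_true, if_false, ite_false]
            rw [chk_eq s i (by omega)]
            by_cases hc : (decide (i + 1 < s.length) && isOp (s.getD (i + 1) ' ')) = true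
            · simp only [hc, if_true, ite_true]
              rw [runB_skip, ih (i + 2) _ (by omega)]
            · simp only [hc, Bool.false_eq_true, if_false, ite_false]
              rw [single_char_slice s i h, ih (i + 1) _ (by omega)]
    · rw [List.drop_eq_nil_of_le (by omega), loopA]
      simp only [runB]
      rw [dif_neg (by omega)]

-- ===== VERDICT (by name: the statement is the Claim_ definition above) =====
theorem break_regex_spec : Claim_equal_break_regex := by
  intro pattern _ _
  unfold Spec_break_regex break_regex break_regex_alt
  have := mainEq pattern.toList pattern.toList.length 0 [] (by omega)
  simpa using this.symm
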